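-- pv_equiv track=rewrite | github.com/seankmartin/lfp_atn | lfp_atn_simuran/index_axona_files.py | get_habituation_folder
-- ===== SOURCE A (Python) =====
-- def get_habituation_folder(s):
--     """Get the type of maze from folder"""
--     names_part = ["habituation", "hab", "hab1", "hab2", "hab3", "hab4", "hab5"]
--     temp = s.split("/")
--     for name in temp:
--         for parts in names_part:
--             if parts in name:
--                 return 1
--     return 0
-- ===== SOURCE B (Python) =====
-- def get_habituation_folder(s):
--     """Get the type of maze from folder"""
--     # every keyword of A contains "hab", so one substring test per segment suffices
--     return int(any("hab" in seg for seg in s.split("/")))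
-- ===== Notes on version B (the rewrite author's own statement) =====
-- stated objective: simpler
-- what changed: All seven keywords contain the substring "hab", so the inner 7-element keyword scan is replaced by a single "hab" substring test per path segment, collapsing the nested loops into one any() pass.
import Mathlib
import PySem

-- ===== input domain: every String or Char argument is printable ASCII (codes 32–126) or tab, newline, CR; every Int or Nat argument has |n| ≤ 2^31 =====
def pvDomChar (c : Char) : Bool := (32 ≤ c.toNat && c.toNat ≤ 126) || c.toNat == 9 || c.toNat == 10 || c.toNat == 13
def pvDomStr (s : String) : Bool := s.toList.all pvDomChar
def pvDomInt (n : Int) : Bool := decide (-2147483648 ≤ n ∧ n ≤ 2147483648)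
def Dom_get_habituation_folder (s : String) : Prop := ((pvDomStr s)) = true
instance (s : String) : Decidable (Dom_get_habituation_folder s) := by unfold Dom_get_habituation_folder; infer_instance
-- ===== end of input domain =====

-- B replaces A's nested keyword scan by a single "hab" substring test per segment (every keyword contains "hab"); objective: simpler.

-- ===== PORT A =====
-- names_part, in A's order
def habNamesPart : List (List Char) :=
  ["habituation".toList, "hab".toList, "hab1".toList, "hab2".toList,
   "hab3".toList, "hab4".toList, "hab5".toList]

-- the double loop: first segment whose name contains some keyword returns 1
def habGoA : List (List Char) → Int
  | [] => 0
  | name :: rest =>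
    if habNamesPart.any (fun parts => PySem.Chars.isIn parts name) then 1 else habGoA rest

def get_habituation_folder (s : String) : Int :=
  habGoA (PySem.Chars.splitOn s.toList "/".toList)

-- ===== PORT B =====
def get_habituation_folder_alt (s : String) : Int :=
  if (PySem.Chars.splitOn s.toList "/".toList).any
      (fun seg => PySem.Chars.isIn "hab".toList seg) then 1 else 0

-- ===== PRECONDITION & SPEC =====
def Spec_get_habituation_folder (s : String) (out : Int) : Prop := out = get_habituation_folder_alt s
instance (s : String) (out : Int) : Decidable (Spec_get_habituation_folder s out) := by unfold Spec_get_habituation_folder; infer_instance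

-- ===== CLAIM (what is proved, stated in full; the proofs are below) =====
def Claim_equal_get_habituation_folder : Prop := ∀ (s : String), Dom_get_habituation_folder s → Spec_get_habituation_folder s (get_habituation_folder s)

-- ===== LEMMAS AND PROOFS =====

-- every keyword of A contains "hab", so the keyword scan on one segment equals the single "hab" test
theorem habNamesPart_any_eq (name : List Char) :
    habNamesPart.any (fun parts => PySem.Chars.isIn parts name)
      = PySem.Chars.isIn "hab".toList name := by
  rw [show "hab".toList = ['h','a','b'] from rfl]
  cases h : PySem.Chars.isIn ['h','a','b'] name with
  | true =>
    simp only [habNamesPart, List.any_cons, Bool.or_eq_true]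
    exact Or.inr (Or.inl h)
  | false =>
    rw [PySem.Chars.isIn_eq_false_iff] at h
    simp only [habNamesPart, List.any_cons, List.any_nil, Bool.or_eq_false_iff]
    refine ⟨?_, ?_, ?_, ?_, ?_, ?_, ?_, trivial⟩ <;>
      · rw [PySem.Chars.isIn_eq_false_iff]
        intro hinf
        exact h (List.IsInfix.trans (by decide) hinf)

theorem habGoA_eq (l : List (List Char)) :
    habGoA l = if l.any (fun seg => PySem.Chars.isIn "hab".toList seg) then 1 else 0 := by
  induction l with
  | nil => rfl
  | cons name rest ih =>
    rw [show "hab".toList = ['h','a','b'] from rfl] at ih ⊢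
    simp only [habGoA, habNamesPart_any_eq, List.any_cons, Bool.or_eq_true,
      show "hab".toList = ['h','a','b'] from rfl]
    by_cases h : PySem.Chars.isIn ['h','a','b'] name = true <;> simp [h, ih]

-- ===== VERDICT (by name: the statement is the Claim_ definition above) =====
theorem get_habituation_folder_spec : Claim_equal_get_habituation_folder := by
  intro s _
  unfold Spec_get_habituation_folder get_habituation_folder get_habituation_folder_alt
  exact habGoA_eq _
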